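-- pv_equiv track=rewrite | github.com/AlexiFa/ProjetGraph | fonctions.py | del_entree
-- ===== SOURCE A (Python) =====
-- def get_entree(graph):
--     tab_entree = []
--     for sommet in graph:
--         if len(sommet) == 2:  # si le sommet n'as aucun prede (donc c une entrée
--             tab_entree.append(sommet[0])
--     del sommet
--     return tab_entree
--
-- def del_entree(tab_copie, tache):
--     tab_entree = get_entree(tab_copie)  # on recup toute les entrée du graph
--     indice = []  # tab avec les indices des entrée dans le tab avec tout les sommets
--     indice_2 = []  # tab avec les indices des prédecesseurs qui vont être suppr
--
--     for entr in tab_entree:  # pour chaque entrée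
--         for i in range(0, len(tab_copie)):  # pour chaque sommet
--             if tab_copie[i][0] == entr:
--                 indice.append(i)  # si le sommet actuel est une entrée, on note son indice car il faudra le suppr
--                 # on ne suppr pas le sommet directement pour éviter de changer la taille du tableau quand on le parcours
--                 # et on veut suppr aussi ce sommet dans les prédécesseurs
--                 for j in range(0, len(tab_copie)):  # pour chaque sommets
--                     if len(tab_copie[j]) <= 2:
--                         continue  # si sa taille est de 2 (ou moins même si ca n'arrive jamais) alors il n'y a pas de prédécesseur à suppr car c'est une entrée
--                         # le continue fait qu'on passe au sommet suivant et on skip les lignes suivantes (dans le for)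
--                     for k in range(2, len(tab_copie[j])):  # on regarde tous les prédécesseurs
--                         if tab_copie[j][k] == entr:
--                             indice_2.append(k)  # si on trouve le prede, alors on note son indice car il faudra le suppr
--                     for h in indice_2:  # apres avoir parcouru les prede du sommet on suppr aux indices qu'on a noté
--                         tab_copie[j].pop(h)  # ne marche pas s'il y a deux fois le même predecesseur (mais en dans les tab de test ca n'arrive jamais et ca n'aurai pas de sens quand on parle d'un projet avec des taches et des durée)
--                         # techniquement on pourrai faire une boucle inverse pour pouvoir suppr deux prede en même temps mais comme il ne peut pas avoir deux fois le meme prede alors on l'a pas fait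
--                         # TODO : si on a le temps, on peu améliorer le code en suppr tout les prede en mm temps (ca pour l'instant on les fait un par un)
--                         # ca sera plus opti car moins de boucle dans les boucle
--                     indice_2 = []  # reset des indices pour le sommet suivant
--     for i in reversed(range(0, len(tab_copie))):  # pour chaque sommet (reversed pas obliatoire)
--         for ind in reversed(indice):  # pour chaque indice (reversed car les sommets sont rangé dans l'ordre croissant donc comme ca on ne change pas les indices si on suppr plz sommet en mm temps)
--             if i == ind:
--                 tache.append(tab_copie[i][0])  # on note le code de la tache à qui on veux ajouter le rang
--                 # on le fait avant que le tableau soit modifié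
--                 tab_copie.pop(i)  # si l'indice est le même qu'on sommet entrée alors on suppr
--     # jsp pk mais les del ne marchent pas dans cette fonction (à chercher)
--     return tab_copie
-- ===== SOURCE B (Python) =====
-- def del_entree(tab_copie, tache):
--     entrees = {s[0] for s in tab_copie if len(s) == 2}
--     if not entrees:
--         return tab_copie
--     kept = []
--     removed = []
--     for s in tab_copie:
--         if s[0] in entrees:
--             removed.append(s[0])
--         else:
--             kept.append(s[:2] + [p for p in s[2:] if p not in entrees])
--     tache.extend(reversed(removed))
--     tab_copie[:] = kept
--     return tab_copie
-- ===== Notes on version B (the rewrite author's own statement) =====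
-- stated objective: alternative
-- what changed: B replaces A's quadruply-nested index scans (for each entry, rescan all vertices, rescan all predecessor lists, collect indices and pop one by one, then a reversed double loop to delete rows) by one set of entry codes built once and a single pass over the vertices that drops entry rows and filters their codes out of each predecessor list (returning immediately when there are no entries).
-- outside the precondition, e.g. on del_entree([], []): A raises UnboundLocalError, B returns []; on del_entree([[1, 2], []], []): A raises IndexError, B raises IndexError; on del_entree([[1, 0], [2, 5, 1, 1, 3]], []): A returns [[2, 5, 1]], B returns [[2, 5, 3]]
import Mathlib
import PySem

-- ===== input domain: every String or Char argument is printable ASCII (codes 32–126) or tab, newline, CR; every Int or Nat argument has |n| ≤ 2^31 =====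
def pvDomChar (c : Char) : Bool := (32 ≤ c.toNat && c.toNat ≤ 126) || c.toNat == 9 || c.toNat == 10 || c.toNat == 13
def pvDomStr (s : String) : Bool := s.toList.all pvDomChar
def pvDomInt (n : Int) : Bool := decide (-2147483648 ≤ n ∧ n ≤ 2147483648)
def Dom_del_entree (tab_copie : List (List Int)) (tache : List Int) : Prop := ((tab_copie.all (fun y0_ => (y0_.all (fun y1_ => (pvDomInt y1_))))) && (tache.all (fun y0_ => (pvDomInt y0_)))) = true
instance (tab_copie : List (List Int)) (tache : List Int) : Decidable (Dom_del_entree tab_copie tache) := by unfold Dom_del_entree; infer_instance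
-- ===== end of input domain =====

-- B removes the entry vertices and their occurrences in predecessor lists with one set of entry
-- codes and a single pass over the graph, instead of A's per-entry rescans of all vertices and all
-- predecessor lists with collected-index pops (objective: alternative). Both A and B mutate
-- tab_copie and tache in place in Python; the equivalence proved here is about the RETURN value
-- only (B performs the same mutations).

-- ===== PORT A =====
-- list.pop(i); the `.getD xs` fallback is the IndexError case, unreachable under Pre_
def pyPopAt {α : Type} (xs : List α) (i : Int) : List α :=
  ((PySem.List.pop? xs i).map Prod.snd).getD xs

def get_entree (graph : List (List Int)) : List Int :=
  graph.foldl (fun tab_entree sommet =>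
    if sommet.length == 2 then tab_entree ++ [PySem.List.pyGetD sommet 0 0] else tab_entree) []

-- body of A's j-loop for one row: collect indices k ≥ 2 with row[k] == entr, then pop them in order
def pySweepRow (entr : Int) (row : List Int) : List Int :=
  if row.length ≤ 2 then row
  else
    let indice_2 := (PySem.List.pyRange 2 row.length 1).foldl
      (fun acc k => if PySem.List.pyGetD row k 0 == entr then acc ++ [k] else acc) []
    indice_2.foldl (fun r h => pyPopAt r h) row

def del_entree (tab_copie : List (List Int)) (tache : List Int) : List (List Int) :=
  let tab_entree := get_entree tab_copie
  let st := tab_entree.foldl (fun (st : List (List Int) × List Int) entr =>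
      (PySem.List.pyRange 0 st.1.length 1).foldl (fun st i =>
        if PySem.List.pyGetD (PySem.List.pyGetD st.1 i []) 0 0 == entr then
          (((PySem.List.pyRange 0 st.1.length 1).foldl (fun tab j =>
              PySem.List.pySetD tab j (pySweepRow entr (PySem.List.pyGetD tab j []))) st.1),
           st.2 ++ [i])
        else st) st)
    (tab_copie, ([] : List Int))
  -- tache.append(...) does not affect the returned value and is dropped here
  (PySem.List.pyRange 0 st.1.length 1).reverse.foldl (fun tab i =>
    st.2.reverse.foldl (fun tab ind =>
      if i == ind then pyPopAt tab i else tab) tab) st.1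

-- ===== PORT B =====
def del_entree_alt (tab_copie : List (List Int)) (tache : List Int) : List (List Int) :=
  let entrees : PySem.Set Int := PySem.Set.ofList
    ((tab_copie.filter (fun s => s.length == 2)).map (fun s => PySem.List.pyGetD s 0 0))
  if entrees.isEmpty then tab_copie else
  -- single pass: st.1 = kept, st.2 = removed  (tache.extend(reversed(removed)) does not affect the return)
  (tab_copie.foldl (fun (st : List (List Int) × List Int) s =>
      if PySem.Set.contains entrees (PySem.List.pyGetD s 0 0) then
        (st.1, st.2 ++ [PySem.List.pyGetD s 0 0])
      else
        (st.1 ++ [s.take 2 ++ (s.drop 2).filter (fun p => !(PySem.Set.contains entrees p))], st.2))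
    (([] : List (List Int)), ([] : List Int))).1

-- ===== PRECONDITION & SPEC =====
-- Pre_ restricts to well-formed graphs: a non-empty graph (on [] A raises UnboundLocalError at
-- 'del sommet'), no empty vertex row when an entry vertex exists (there A raises IndexError while
-- B may return), no two entry vertices sharing a code and no predecessor list containing the same
-- entry code twice — on duplicated entry codes or duplicated predecessors A's collected-index
-- popping removes wrong elements or raises IndexError (A's own comments admit both), so those
-- inputs are excluded as un-well-formed rather than matched.
def Pre_del_entree (tab_copie : List (List Int)) (tache : List Int) : Prop :=
  tab_copie ≠ [] ∧
  (tab_copie.filter (fun r => r.length == 2) ≠ [] → ∀ r ∈ tab_copie, r ≠ []) ∧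
  ((tab_copie.filter (fun r => r.length == 2)).map (fun r => r.headD 0)).Nodup ∧
  (∀ e ∈ (tab_copie.filter (fun r => r.length == 2)).map (fun r => r.headD 0),
     ∀ r ∈ tab_copie, (r.drop 2).count e ≤ 1)
instance (tab_copie : List (List Int)) (tache : List Int) : Decidable (Pre_del_entree tab_copie tache) := by
  unfold Pre_del_entree; infer_instance

def pvWitness_del_entree : List (List Int) × List Int := ([[1, 5], [2, 3, 1], [3, 4, 1, 2]], [])

def Spec_del_entree (tab_copie : List (List Int)) (tache : List Int) (out : List (List Int)) : Prop := out = del_entree_alt tab_copie tache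
instance (tab_copie : List (List Int)) (tache : List Int) (out : List (List Int)) : Decidable (Spec_del_entree tab_copie tache out) := by unfold Spec_del_entree; infer_instance

-- ===== CLAIM (what is proved, stated in full; the proofs are below) =====
def Claim_equal_del_entree : Prop := ∀ (tab_copie : List (List Int)) (tache : List Int), Dom_del_entree tab_copie tache → Pre_del_entree tab_copie tache → Spec_del_entree tab_copie tache (del_entree tab_copie tache)

-- ===== LEMMAS AND PROOFS =====

-- proof-only abbreviations
def pvHd (r : List Int) : Int := PySem.List.pyGetD r 0 0
def pvRowS (e : Int) (r : List Int) : List Int :=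
  r.take 2 ++ (r.drop 2).filter (fun p => !(p == e))
def pvRowAll (P : List Int) (r : List Int) : List Int :=
  r.take 2 ++ (r.drop 2).filter (fun p => !(P.contains p))
def pvE0 (tab : List (List Int)) : List Int :=
  (tab.filter (fun r => r.length == 2)).map (fun r => PySem.List.pyGetD r 0 0)

theorem pvHd_eq_headD (r : List Int) : pvHd r = r.headD 0 := by
  cases r <;> simp [pvHd, PySem.List.pyGetD, PySem.List.pyGet?, PySem.List.pyIdx?]

theorem pvE0_headD (tab : List (List Int)) :
    pvE0 tab = (tab.filter (fun r => r.length == 2)).map (fun r => r.headD 0) := by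
  unfold pvE0
  exact List.map_congr_left fun r _ => pvHd_eq_headD r

theorem pvFoldlAdd_nodup (xs : List Int) : ∀ (s : List Int), (s ++ xs).Nodup →
    xs.foldl PySem.Set.add s = s ++ xs := by
  induction xs with
  | nil => intro s _; simp
  | cons x xs ih =>
    intro s h
    have hx : x ∉ s := by
      have := List.disjoint_of_nodup_append h
      intro hmem; exact this hmem (by simp)
    have hadd : PySem.Set.add s x = s ++ [x] := by
      simp [PySem.Set.add, PySem.Set.contains, hx]
    have h' : ((s ++ [x]) ++ xs).Nodup := by simpa using h
    simp only [List.foldl_cons, hadd, ih _ h']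
    simp

-- Set.ofList of a duplicate-free list is the list itself
theorem pvOfList_nodup (xs : List Int) (h : xs.Nodup) : PySem.Set.ofList xs = xs := by
  simpa [PySem.Set.ofList, PySem.Set.empty] using pvFoldlAdd_nodup xs [] (by simpa using h)

theorem pvB_fold (E : List Int) (l : List (List Int)) : ∀ (k : List (List Int)) (rm : List Int),
    ((l.foldl (fun (st : List (List Int) × List Int)  s =>
      if PySem.Set.contains E (PySem.List.pyGetD s 0 0) then
        (st.1, st.2 ++ [PySem.List.pyGetD s 0 0])
      else
        (st.1 ++ [s.take 2 ++ (s.drop 2).filter (fun p => !(PySem.Set.contains E p))], st.2))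
      (k, rm)).1)
    = k ++ (l.filter (fun s => !(E.contains (pvHd s)))).map (pvRowAll E) := by
  induction l with
  | nil => intro k rm; simp
  | cons s l ih =>
    intro k rm
    simp only [List.foldl_cons]
    have hR : (List.take 2 s ++ List.filter (fun p => !PySem.Set.contains E p) (List.drop 2 s)) = pvRowAll E s := rfl
    have hC : PySem.Set.contains E (PySem.List.pyGetD s 0 0) = E.contains (pvHd s) := rfl
    cases hcb : E.contains (pvHd s) with
    | true =>
      rw [hC, hcb, if_pos rfl, ih, List.filter_cons_of_neg (by simp only [hcb]; decide)]
    | false =>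
      rw [hC, hcb, if_neg (by simp), hR, ih, List.filter_cons_of_pos (by simp only [hcb]; decide)]
      simp [List.append_assoc]

theorem pvRowAll_nil' (r : List Int) : pvRowAll [] r = r := by
  simp [pvRowAll]

-- B as filter-then-map
theorem pvB_eq (tab : List (List Int)) (tache : List Int) (hE : PySem.Set.ofList (pvE0 tab) = pvE0 tab) :
    del_entree_alt tab tache
      = (tab.filter (fun s => !((pvE0 tab).contains (pvHd s)))).map (pvRowAll (pvE0 tab)) := by
  unfold del_entree_alt
  rw [show ((tab.filter (fun s => s.length == 2)).map (fun s => PySem.List.pyGetD s 0 0)) = pvE0 tab from rfl]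
  rw [hE]
  by_cases hE0 : pvE0 tab = []
  · rw [hE0]
    rw [if_pos (by simp)]
    rw [List.filter_eq_self.mpr (fun s _ => by simp)]
    rw [List.map_congr_left (fun r (_ : r ∈ tab) => pvRowAll_nil' r)]
    exact (List.map_id' tab).symm
  · rw [if_neg (by simpa using hE0)]
    simpa using pvB_fold (pvE0 tab) tab [] []

-- A: get_entree
theorem pvGetEntree (tab : List (List Int)) : get_entree tab = pvE0 tab := by
  unfold get_entree pvE0
  rw [PySem.List.foldl_append_if]
  simp

-- A: one j-loop body on one row
theorem pvSweep_eq (e : Int) (r : List Int) (h : (r.drop 2).count e ≤ 1) :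
    pySweepRow e r = pvRowS e r := by
  unfold pySweepRow pvRowS
  by_cases hlen : r.length ≤ 2
  · rw [if_pos hlen, List.drop_eq_nil_of_le hlen]
    simp [List.take_of_length_le hlen]
  · rw [if_neg hlen]
    push Not at hlen
    simp only []
    rw [PySem.List.foldl_append_if (f := fun (k : Int) => k)]
    rw [List.nil_append, List.map_id']
    rcases Nat.le_one_iff_eq_zero_or_eq_one.mp h with h0 | h1
    · have hnot : e ∉ r.drop 2 := by rwa [← List.count_eq_zero]
      have hfil : (PySem.List.pyRange 2 (r.length : Int) 1).filter
          (fun k => PySem.List.pyGetD r k 0 == e) = [] := by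
        rw [List.filter_eq_nil_iff]
        intro k hk
        rw [PySem.List.mem_pyRange_one] at hk
        rw [PySem.List.pyGetD_eq_getElem r 0 (by omega) (by exact_mod_cast hk.2)]
        have hk2 : k.toNat - 2 < (r.drop 2).length := by simp; omega
        have hmem : r[k.toNat] ∈ r.drop 2 := by
          have hg : (r.drop 2)[k.toNat - 2]'hk2 = r[k.toNat]'(by omega) := by
            rw [List.getElem_drop]
            congr 1
            omega
          rw [← hg]
          exact List.getElem_mem hk2
        simp only [beq_iff_eq]
        intro heq
        exact hnot (heq ▸ hmem)
      rw [hfil, List.foldl_nil, List.filter_eq_self.mpr ?_, List.take_append_drop]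
      intro a ha
      simp only [Bool.not_eq_eq_eq_not, Bool.not_true, beq_eq_false_iff_ne]
      exact fun heq => hnot (heq ▸ ha)
    · have hmem : e ∈ r.drop 2 := by
        rw [← List.count_pos_iff]
        omega
      obtain ⟨u, v, huv⟩ := List.append_of_mem hmem
      have hcu : e ∉ u ∧ e ∉ v := by
        rw [huv] at h1
        simp [List.count_append, List.count_cons] at h1
        constructor <;> rw [← List.count_eq_zero] <;> omega
      have ht2 : (r.take 2).length = 2 := by simp; omega
      have hr : r = (r.take 2 ++ u) ++ e :: v := by
        rw [List.append_assoc, ← huv, List.take_append_drop]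
      have hrlen : r.length = 2 + u.length + 1 + v.length := by
        conv_lhs => rw [hr]
        simp [ht2]
        omega
      have hmlt : 2 + u.length < r.length := by omega
      -- the collected index list is exactly [2 + u.length]
      have huvlen : (u ++ e :: v).length = r.length - 2 := by rw [← huv]; simp
      have hval : ∀ (k : Int) (_ : 2 ≤ k) (_ : k < (r.length : Int))
          (hb : k.toNat - 2 < (u ++ e :: v).length),
          PySem.List.pyGetD r k 0 = (u ++ e :: v)[k.toNat - 2]'hb := by
        intro k h2 hklen hb
        rw [PySem.List.pyGetD_eq_getElem r 0 (by omega) hklen]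
        simp only [← huv]
        rw [List.getElem_drop]
        congr 1
        omega
      have hgen : ∀ (j : Nat) (hb : j < (e :: v).length), 1 ≤ j → (e :: v)[j] ∈ v := by
        intro j hb hj
        cases j with
        | zero => omega
        | succ j' =>
          rw [List.getElem_cons_succ]
          exact List.getElem_mem _
      have hfil : (PySem.List.pyRange 2 (r.length : Int) 1).filter
          (fun k => PySem.List.pyGetD r k 0 == e) = [((2 + u.length : Nat) : Int)] := by
        have hm2 : (2 : Int) ≤ ((2 + u.length : Nat) : Int) := by push_cast; omega
        have hmlen' : ((2 + u.length : Nat) : Int) ≤ (r.length : Int) := by push_cast; omega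
        rw [PySem.List.pyRange_one_append 2 ((2 + u.length : Nat) : Int) (r.length : Int) hm2 hmlen',
            PySem.List.pyRange_one_cons (a := ((2 + u.length : Nat) : Int)) (b := (r.length : Int)) (by push_cast; omega),
            List.filter_append, List.filter_cons]
        have h1f : (PySem.List.pyRange 2 ((2 + u.length : Nat) : Int) 1).filter
            (fun k => PySem.List.pyGetD r k 0 == e) = [] := by
          rw [List.filter_eq_nil_iff]
          intro k hk
          rw [PySem.List.mem_pyRange_one] at hk
          have hku : k.toNat - 2 < u.length := by
            rcases hk with ⟨hk1, hk2⟩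
            push_cast at hk2
            omega
          rw [hval k hk.1 (by push_cast at hk ⊢; omega) (by simp only [huvlen]; omega)]
          rw [List.getElem_append_left hku]
          simp only [beq_iff_eq]
          intro heq
          exact hcu.1 (heq ▸ List.getElem_mem hku)
        have hmid : (PySem.List.pyGetD r ((2 + u.length : Nat) : Int) 0 == e) = true := by
          rw [hval _ hm2 (by push_cast; omega) (by simp only [huvlen]; omega)]
          have hix : ((2 + u.length : Nat) : Int).toNat - 2 = u.length := by omega
          simp only [hix]
          rw [List.getElem_append_right (le_refl u.length)]
          simp
        have h3f : (PySem.List.pyRange (((2 + u.length : Nat) : Int) + 1) (r.length : Int) 1).filter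
            (fun k => PySem.List.pyGetD r k 0 == e) = [] := by
          rw [List.filter_eq_nil_iff]
          intro k hk
          rw [PySem.List.mem_pyRange_one] at hk
          rcases hk with ⟨hk1, hk2⟩
          have hk1' : (2 + u.length : Nat) + 1 ≤ k.toNat := by push_cast at hk1; omega
          rw [hval k (by push_cast at hk1; omega) hk2 (by simp only [huvlen]; push_cast at hk2; omega)]
          have hke : u.length ≤ k.toNat - 2 := by omega
          rw [List.getElem_append_right hke]
          simp only [beq_iff_eq]
          intro heq
          refine hcu.2 ?_
          rw [← heq]
          exact hgen _ _ (by omega)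
        rw [h1f, hmid, if_pos rfl, h3f]
        simp
      rw [hfil, List.foldl_cons, List.foldl_nil]
      have hpop : pyPopAt r ((2 + u.length : Nat) : Int) = (r.take 2 ++ u) ++ v := by
        unfold pyPopAt
        rw [PySem.List.pop?_natCast r (2 + u.length) hmlt]
        simp only [Option.map_some, Option.getD_some]
        conv_lhs => rw [hr]
        rw [List.eraseIdx_append_of_length_le (by simp [ht2])]
        simp [ht2]
      rw [hpop, huv, List.filter_append, List.filter_cons]
      simp only [beq_self_eq_true, Bool.not_true, if_neg (by decide : ¬ (false = true))]
      rw [List.filter_eq_self.mpr ?_, List.filter_eq_self.mpr ?_, List.append_assoc]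
      · intro a ha
        simp only [Bool.not_eq_eq_eq_not, Bool.not_true, beq_eq_false_iff_ne]
        exact fun heq => hcu.2 (heq ▸ ha)
      · intro a ha
        simp only [Bool.not_eq_eq_eq_not, Bool.not_true, beq_eq_false_iff_ne]
        exact fun heq => hcu.1 (heq ▸ ha)


theorem pvRowS_rowAll (P : List Int) (e : Int) (r : List Int) :
    pvRowS e (pvRowAll P r) = pvRowAll (P ++ [e]) r := by
  unfold pvRowS pvRowAll
  by_cases h : r.length ≤ 2
  · rw [List.drop_eq_nil_of_le h]
    simp [List.take_of_length_le h, List.drop_eq_nil_of_le, h]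
  · push Not at h
    rw [List.take_append_of_le_length (by simp; omega), List.take_take,
        List.drop_append_of_le_length (by simp; omega), List.drop_eq_nil_of_le (by simp),
        List.nil_append, List.filter_filter]
    simp only [min_self, List.append_cancel_left_eq]
    apply List.filter_congr
    intro x _
    simp [Bool.and_comm, beq_eq_decide]

theorem pvRowS_idem (e : Int) (r : List Int) : pvRowS e (pvRowS e r) = pvRowS e r := by
  unfold pvRowS
  by_cases h : r.length ≤ 2
  · rw [List.drop_eq_nil_of_le h]
    simp [List.take_of_length_le h, List.drop_eq_nil_of_le, h]
  · push Not at h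
    rw [List.take_append_of_le_length (by simp; omega), List.take_take,
        List.drop_append_of_le_length (by simp; omega), List.drop_eq_nil_of_le (by simp),
        List.nil_append, List.filter_filter]
    simp [Bool.and_self]

theorem pvRowAll_hd (P : List Int) (r : List Int) (h : r ≠ []) :
    pvRowAll P r ≠ [] ∧ pvHd (pvRowAll P r) = pvHd r := by
  cases r with
  | nil => exact absurd rfl h
  | cons x t =>
    constructor
    · simp [pvRowAll]
    · rw [pvHd_eq_headD, pvHd_eq_headD]
      simp [pvRowAll, List.take_cons]

theorem pvRowAll_count (P : List Int) (e : Int) (r : List Int) :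
    ((pvRowAll P r).drop 2).count e ≤ (r.drop 2).count e := by
  unfold pvRowAll
  by_cases h : r.length ≤ 2
  · rw [List.drop_eq_nil_of_le h]
    simp [List.take_of_length_le h, List.drop_eq_nil_of_le h]
  · push Not at h
    rw [List.drop_append_of_le_length (by simp; omega), List.drop_eq_nil_of_le (by simp),
        List.nil_append]
    apply List.Sublist.count_le
    exact List.filter_sublist

-- the j-sweep fold is a map
theorem pvSweepMap_aux {α : Type} (f : α → α) (d : α) :
    ∀ (rest done : List α),
    (PySem.List.pyRange (done.length : Int) ((done.length : Int) + (rest.length : Int)) 1).foldl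
      (fun t j => PySem.List.pySetD t j (f (PySem.List.pyGetD t j d))) (done ++ rest)
    = done ++ rest.map f := by
  intro rest
  induction rest with
  | nil => intro done; simp [PySem.List.pyRange_one_eq_nil]
  | cons x rest ih =>
    intro done
    have hlt : (done.length : Int) < (done.length : Int) + ((x :: rest).length : Int) := by
      simp
    rw [PySem.List.pyRange_one_cons hlt, List.foldl_cons]
    have hget : PySem.List.pyGetD (done ++ x :: rest) (done.length : Int) d = x := by
      rw [PySem.List.pyGetD_natCast]
      simp
    have hset : PySem.List.pySetD (done ++ x :: rest) (done.length : Int) (f x)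
        = (done ++ [f x]) ++ rest := by
      rw [PySem.List.pySetD_natCast]
      rw [List.set_append_right _ _ (le_refl _)]
      simp
    rw [hget, hset]
    have harith : ((done.length : Int) + 1) = (((done ++ [f x]).length : Int)) := by
      simp
    have harith2 : ((done.length : Int) + ((x :: rest).length : Int))
        = (((done ++ [f x]).length : Int) + (rest.length : Int)) := by
      simp
      omega
    rw [show PySem.List.pyRange ((done.length : Int) + 1) ((done.length : Int) + ((x :: rest).length : Int)) 1
        = PySem.List.pyRange (((done ++ [f x]).length : Int)) (((done ++ [f x]).length : Int) + (rest.length : Int)) 1 by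
      rw [harith, harith2]]
    rw [ih (done ++ [f x])]
    simp

theorem pvSweepMap {α : Type} (f : α → α) (d : α) (tab : List α) :
    (PySem.List.pyRange 0 (tab.length : Int) 1).foldl
      (fun t j => PySem.List.pySetD t j (f (PySem.List.pyGetD t j d))) tab = tab.map f := by
  simpa using pvSweepMap_aux f d tab []

theorem pvRowS_hd (e : Int) (r : List Int) (h : r ≠ []) :
    pvRowS e r ≠ [] ∧ pvHd (pvRowS e r) = pvHd r := by
  cases r with
  | nil => exact absurd rfl h
  | cons x t =>
    constructor
    · simp [pvRowS]
    · rw [pvHd_eq_headD, pvHd_eq_headD]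
      simp [pvRowS]

theorem pvRowS_notmem (e : Int) (r : List Int) : e ∉ (pvRowS e r).drop 2 := by
  unfold pvRowS
  by_cases h : r.length ≤ 2
  · rw [List.drop_eq_nil_of_le h]
    simp [List.take_of_length_le h, List.drop_eq_nil_of_le h]
  · push Not at h
    rw [List.drop_append_of_le_length (by simp; omega), List.drop_eq_nil_of_le (by simp),
        List.nil_append]
    intro hmem
    have := (List.mem_filter.mp hmem).2
    simp at this

-- one pass of A's i-loop for a fixed entry code e
theorem pvILoop (e : Int) (tab0 : List (List Int))
    (h1 : ∀ r ∈ tab0, r ≠ [])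
    (hcnt : ∀ r ∈ tab0, (r.drop 2).count e ≤ 1) :
    ∀ (m : Nat) (a : Int), 0 ≤ a → a + m = (tab0.length : Int) →
    ∀ (t : List (List Int)) (ind : List Int), (t = tab0 ∨ t = tab0.map (pvRowS e)) →
    (PySem.List.pyRange a (tab0.length : Int) 1).foldl
      (fun (st : List (List Int) × List Int) i =>
        if PySem.List.pyGetD (PySem.List.pyGetD st.1 i []) 0 0 == e then
          (((PySem.List.pyRange 0 (st.1.length : Int) 1).foldl (fun tab j =>
              PySem.List.pySetD tab j (pySweepRow e (PySem.List.pyGetD tab j []))) st.1),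
           st.2 ++ [i])
        else st) (t, ind)
    = (if (PySem.List.pyRange a (tab0.length : Int) 1).any
          (fun i => pvHd (PySem.List.pyGetD tab0 i []) == e)
        then tab0.map (pvRowS e) else t,
       ind ++ (PySem.List.pyRange a (tab0.length : Int) 1).filter
          (fun i => pvHd (PySem.List.pyGetD tab0 i []) == e)) := by
  intro m
  induction m with
  | zero =>
    intro a ha hm t ind ht
    rw [PySem.List.pyRange_one_eq_nil (by omega)]
    simp
  | succ m ih =>
    intro a ha hm t ind ht
    have hlt : a < (tab0.length : Int) := by omega
    rw [PySem.List.pyRange_one_cons hlt, List.foldl_cons, List.any_cons, List.filter_cons]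
    have hlen_t : t.length = tab0.length := by
      rcases ht with rfl | rfl <;> simp
    have halt : a < (t.length : Int) := by rw [hlen_t]; exact hlt
    have hrow0 : PySem.List.pyGetD tab0 a [] = tab0[a.toNat]'(by omega) :=
      PySem.List.pyGetD_eq_getElem tab0 [] ha (by omega)
    have hrow0_mem : tab0[a.toNat]'(by omega) ∈ tab0 := List.getElem_mem _
    have hcond : PySem.List.pyGetD (PySem.List.pyGetD t a []) 0 0
        = pvHd (PySem.List.pyGetD tab0 a []) := by
      rw [PySem.List.pyGetD_eq_getElem t [] ha (by exact_mod_cast halt), hrow0]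
      rcases ht with rfl | rfl
      · rfl
      · rw [List.getElem_map]
        exact (pvRowS_hd e _ (h1 _ (by simpa using hrow0_mem))).2
    rw [hcond]
    cases hc : (pvHd (PySem.List.pyGetD tab0 a []) == e) with
    | false =>
      rw [if_neg (by simp), Bool.false_or]
      exact ih (a + 1) (by omega) (by omega) t ind ht
    | true =>
      rw [if_pos rfl]
      have hsweep : ∀ (t' : List (List Int)), (t' = tab0 ∨ t' = tab0.map (pvRowS e)) →
          (PySem.List.pyRange 0 (t'.length : Int) 1).foldl (fun tab j =>
              PySem.List.pySetD tab j (pySweepRow e (PySem.List.pyGetD tab j []))) t'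
          = tab0.map (pvRowS e) := by
        intro t' ht'
        rw [pvSweepMap (pySweepRow e) [] t']
        rcases ht' with rfl | rfl
        · exact List.map_congr_left fun r hr => pvSweep_eq e r (hcnt r hr)
        · rw [List.map_map]
          apply List.map_congr_left
          intro r hr
          have : pySweepRow e (pvRowS e r) = pvRowS e (pvRowS e r) :=
            pvSweep_eq e _ (by
              have := pvRowS_notmem e r
              rw [← List.count_eq_zero] at this
              omega)
          rw [Function.comp_apply, this, pvRowS_idem]
      rw [hsweep t ht]
      rw [ih (a + 1) (by omega) (by omega) (tab0.map (pvRowS e)) (ind ++ [a]) (Or.inr rfl)]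
      simp only [ite_self, hc, Bool.true_or, if_true, List.append_assoc, List.singleton_append]

theorem pvE0_exists (tab : List (List Int)) (e : Int) (he : e ∈ pvE0 tab) :
    ∃ (n : Nat) (hn : n < tab.length), pvHd (tab[n]'hn) = e := by
  unfold pvE0 at he
  rw [List.mem_map] at he
  obtain ⟨r, hr, hre⟩ := he
  have hrtab : r ∈ tab := (List.mem_filter.mp hr).1
  obtain ⟨n, hn, rfl⟩ := List.mem_iff_getElem.mp hrtab
  exact ⟨n, hn, hre⟩

-- A's whole phase 1 (the fold over tab_entree)
theorem pvPhase1 (tab : List (List Int)) (hne : ∀ r ∈ tab, r ≠ [])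
    (hcntAll : ∀ e ∈ pvE0 tab, ∀ r ∈ tab, (r.drop 2).count e ≤ 1) :
    ∀ (E' : List Int), (∀ e ∈ E', e ∈ pvE0 tab) → ∀ (P : List Int) (ind : List Int),
    E'.foldl (fun (st : List (List Int) × List Int) entr =>
      (PySem.List.pyRange 0 (st.1.length : Int) 1).foldl (fun st i =>
        if PySem.List.pyGetD (PySem.List.pyGetD st.1 i []) 0 0 == entr then
          (((PySem.List.pyRange 0 (st.1.length : Int) 1).foldl (fun tab j =>
              PySem.List.pySetD tab j (pySweepRow entr (PySem.List.pyGetD tab j []))) st.1),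
           st.2 ++ [i])
        else st) st) (tab.map (pvRowAll P), ind)
    = (tab.map (pvRowAll (P ++ E')),
       ind ++ E'.flatMap (fun e => (PySem.List.pyRange 0 (tab.length : Int) 1).filter
          (fun i => pvHd (PySem.List.pyGetD tab i []) == e))) := by
  intro E'
  induction E' with
  | nil => intro _ P ind; simp
  | cons ecur E' ih =>
    intro hsub P ind
    rw [List.foldl_cons]
    set tab0 : List (List Int) := tab.map (pvRowAll P) with htab0
    have h1' : ∀ r ∈ tab0, r ≠ [] := by
      intro r hr
      rw [htab0, List.mem_map] at hr
      obtain ⟨r0, hr0, rfl⟩ := hr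
      exact (pvRowAll_hd P r0 (hne r0 hr0)).1
    have hcnt' : ∀ r ∈ tab0, (r.drop 2).count ecur ≤ 1 := by
      intro r hr
      rw [htab0, List.mem_map] at hr
      obtain ⟨r0, hr0, rfl⟩ := hr
      exact le_trans (pvRowAll_count P ecur r0) (hcntAll ecur (hsub ecur (by simp)) r0 hr0)
    have hlen0 : tab0.length = tab.length := by rw [htab0]; simp
    have hhd0 : ∀ (i : Int), 0 ≤ i → i < (tab.length : Int) →
        pvHd (PySem.List.pyGetD tab0 i []) = pvHd (PySem.List.pyGetD tab i []) := by
      intro i h0 hilen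
      rw [PySem.List.pyGetD_eq_getElem tab0 [] h0 (by omega),
          PySem.List.pyGetD_eq_getElem tab [] h0 (by exact_mod_cast hilen)]
      simp only [htab0, List.getElem_map]
      exact (pvRowAll_hd P _ (hne _ (List.getElem_mem _))).2
    have hstep := pvILoop ecur tab0 h1' hcnt' tab0.length 0 le_rfl (by simp) tab0 ind (Or.inl rfl)
    obtain ⟨n, hn, hne2⟩ := pvE0_exists tab ecur (hsub ecur (by simp))
    have hanyT : (PySem.List.pyRange 0 (tab0.length : Int) 1).any
        (fun i => pvHd (PySem.List.pyGetD tab0 i []) == ecur) = true := by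
      rw [List.any_eq_true]
      refine ⟨(n : Int), ?_, ?_⟩
      · rw [PySem.List.mem_pyRange_one]
        constructor
        · omega
        · rw [hlen0]; exact_mod_cast hn
      · rw [hhd0 (n : Int) (by omega) (by exact_mod_cast hn)]
        rw [PySem.List.pyGetD_eq_getElem tab [] (by omega) (by exact_mod_cast hn)]
        simp only [Int.toNat_natCast]
        rw [hne2]
        exact beq_self_eq_true ecur
    rw [hstep, hanyT, if_pos rfl]
    have hmap : tab0.map (pvRowS ecur) = tab.map (pvRowAll (P ++ [ecur])) := by
      rw [htab0, List.map_map]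
      exact List.map_congr_left fun r _ => pvRowS_rowAll P ecur r
    have hfil : (PySem.List.pyRange 0 (tab0.length : Int) 1).filter
          (fun i => pvHd (PySem.List.pyGetD tab0 i []) == ecur)
        = (PySem.List.pyRange 0 (tab.length : Int) 1).filter
          (fun i => pvHd (PySem.List.pyGetD tab i []) == ecur) := by
      rw [hlen0]
      apply List.filter_congr
      intro i hi
      rw [PySem.List.mem_pyRange_one] at hi
      rw [hhd0 i hi.1 hi.2]
    rw [hmap, hfil]
    rw [ih (fun e he => hsub e (by simp [he])) (P ++ [ecur]) (ind ++ _)]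
    simp [List.append_assoc]

-- A's inner phase-2 loop over indice: at most one pop since indice has no duplicate of i
theorem pvInner (i : Int) : ∀ (I : List Int) (t : List (List Int)), I.count i ≤ 1 →
    I.reverse.foldl (fun t ind => if i == ind then pyPopAt t i else t) t
    = if I.contains i then pyPopAt t i else t := by
  intro I
  induction I with
  | nil => intro t _; simp
  | cons x I ihI =>
    intro t hcount
    rw [List.reverse_cons, List.foldl_append, List.foldl_cons, List.foldl_nil]
    rw [List.count_cons] at hcount
    have hcI : I.count i ≤ 1 := by split at hcount <;> omega
    rw [ihI t hcI]
    cases hxi : (i == x) with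
    | true =>
      have hix : i = x := by simpa using hxi
      have hc0 : I.count i = 0 := by
        rw [if_pos (by simp [hix])] at hcount
        omega
      have hnm : i ∉ I := List.count_eq_zero.mp hc0
      subst hix
      simp [hnm]
    | false =>
      have hne2 : i ≠ x := by simpa using hxi
      rw [if_neg (by simp [hxi])]
      have hcc : (x :: I).contains i = I.contains i := by
        simp only [List.contains_cons]
        rw [hxi]
        simp
      rw [hcc]

-- A's outer phase-2 loop: descending pops are a positional filter
theorem pvPhase2 : ∀ (k : Nat) (t : List (List Int)) (p : Int → Bool), k ≤ t.length →
    (PySem.List.pyRange 0 (k : Int) 1).reverse.foldl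
      (fun t i => if p i then pyPopAt t i else t) t
    = ((PySem.List.pyRange 0 (k : Int) 1).filter (fun i => !(p i))).map
        (fun i => PySem.List.pyGetD t i []) ++ t.drop k := by
  intro k
  induction k with
  | zero => intro t p _; simp [PySem.List.pyRange_one_eq_nil]
  | succ k ihk =>
    intro t p hk
    have hklen : k < t.length := hk
    have hsplit : PySem.List.pyRange 0 ((k + 1 : Nat) : Int) 1
        = PySem.List.pyRange 0 (k : Nat) 1 ++ [((k : Nat) : Int)] := by
      push_cast
      exact PySem.List.pyRange_one_succ_right (by omega)
    rw [hsplit, List.reverse_append, List.reverse_singleton, List.singleton_append,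
        List.foldl_cons, List.filter_append, List.map_append]
    have hpop : pyPopAt t ((k : Nat) : Int) = t.take k ++ t.drop (k + 1) := by
      unfold pyPopAt
      rw [PySem.List.pop?_natCast t k hklen]
      simp [List.eraseIdx_eq_take_drop_succ]
    have hgetc : ∀ (t' : List (List Int)), t'.take k = t.take k → k ≤ t'.length →
        ((PySem.List.pyRange 0 ((k : Nat) : Int) 1).filter (fun i => !(p i))).map
          (fun i => PySem.List.pyGetD t' i [])
        = ((PySem.List.pyRange 0 ((k : Nat) : Int) 1).filter (fun i => !(p i))).map
          (fun i => PySem.List.pyGetD t i []) := by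
      intro t' htake hlen'
      apply List.map_congr_left
      intro i hi
      have hi' := (List.mem_filter.mp hi).1
      rw [PySem.List.mem_pyRange_one] at hi'
      have hik : i.toNat < k := by omega
      rw [PySem.List.pyGetD_eq_getElem t' [] hi'.1 (by omega),
          PySem.List.pyGetD_eq_getElem t [] hi'.1 (by omega)]
      calc t'[i.toNat]'(by omega) = (t'.take k)[i.toNat]'(by simp; omega) := by
              rw [List.getElem_take]
        _ = (t.take k)[i.toNat]'(by simp; omega) := by simp only [htake]
        _ = t[i.toNat]'(by omega) := by rw [List.getElem_take]
    cases hp : p ((k : Nat) : Int) with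
    | true =>
      rw [if_pos rfl, hpop]
      rw [ihk (t.take k ++ t.drop (k + 1)) p (by simp; omega)]
      rw [hgetc _ (by rw [List.take_append_of_le_length (by simp; omega), List.take_take]; simp [List.take_take, min_self, List.take_of_length_le]) (by simp; omega)]
      rw [List.drop_append_of_le_length (by simp; omega)]
      simp [hp, List.drop_eq_nil_of_le, min_self]
    | false =>
      rw [if_neg (by simp [hp])]
      rw [ihk t p (by omega)]
      have hlast : ([((k : Nat) : Int)].filter (fun i => !(p i))).map
          (fun i => PySem.List.pyGetD t i []) = [PySem.List.pyGetD t ((k : Nat) : Int) []] := by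
        simp [hp]
      rw [hlast]
      have hdrop : t.drop k = PySem.List.pyGetD t ((k : Nat) : Int) [] :: t.drop (k + 1) := by
        rw [PySem.List.pyGetD_eq_getElem t [] (by omega) (by exact_mod_cast hklen)]
        simp only [Int.toNat_natCast]
        exact List.drop_eq_getElem_cons hklen
      rw [hdrop]
      simp

-- positional filter-map over the whole range is a plain filter
theorem pvFilterMapRange (t : List (List Int)) (q : List Int → Bool) :
    ((PySem.List.pyRange 0 (t.length : Int) 1).filter (fun i => q (PySem.List.pyGetD t i []))).map
      (fun i => PySem.List.pyGetD t i []) = t.filter q := by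
  induction t using List.reverseRecOn with
  | nil => simp [PySem.List.pyRange_one_eq_nil]
  | append_singleton t x iht =>
    have hsplit : PySem.List.pyRange 0 (((t ++ [x]).length : Nat) : Int) 1
        = PySem.List.pyRange 0 (t.length : Int) 1 ++ [((t.length : Nat) : Int)] := by
      simp only [List.length_append, List.length_singleton]
      push_cast
      exact PySem.List.pyRange_one_succ_right (by omega)
    rw [hsplit, List.filter_append, List.map_append]
    have hget : ∀ (i : Int), 0 ≤ i → i < (t.length : Int) →
        PySem.List.pyGetD (t ++ [x]) i [] = PySem.List.pyGetD t i [] := by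
      intro i h0 hl
      rw [PySem.List.pyGetD_eq_getElem (t ++ [x]) [] h0 (by simp; omega),
          PySem.List.pyGetD_eq_getElem t [] h0 hl]
      exact List.getElem_append_left (by omega)
    have hfil1 : (PySem.List.pyRange 0 (t.length : Int) 1).filter
          (fun i => q (PySem.List.pyGetD (t ++ [x]) i []))
        = (PySem.List.pyRange 0 (t.length : Int) 1).filter
          (fun i => q (PySem.List.pyGetD t i [])) := by
      apply List.filter_congr
      intro i hi
      rw [PySem.List.mem_pyRange_one] at hi
      rw [hget i hi.1 hi.2]
    have hmap1 : ((PySem.List.pyRange 0 (t.length : Int) 1).filter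
          (fun i => q (PySem.List.pyGetD t i []))).map
          (fun i => PySem.List.pyGetD (t ++ [x]) i [])
        = ((PySem.List.pyRange 0 (t.length : Int) 1).filter
          (fun i => q (PySem.List.pyGetD t i []))).map
          (fun i => PySem.List.pyGetD t i []) := by
      apply List.map_congr_left
      intro i hi
      have hi' := (List.mem_filter.mp hi).1
      rw [PySem.List.mem_pyRange_one] at hi'
      exact hget i hi'.1 hi'.2
    have hx : PySem.List.pyGetD (t ++ [x]) ((t.length : Nat) : Int) [] = x := by
      rw [PySem.List.pyGetD_eq_getElem (t ++ [x]) [] (by omega) (by simp)]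
      simp only [Int.toNat_natCast]
      exact List.getElem_concat_length rfl _
    rw [hfil1, hmap1, iht, List.filter_append]
    cases hq : q x with
    | true => simp [hx, hq]
    | false => simp [hx, hq]

theorem pvFlat_nodup (tab : List (List Int)) : ∀ (E : List Int), E.Nodup →
    (E.flatMap (fun e => (PySem.List.pyRange 0 (tab.length : Int) 1).filter
        (fun i => pvHd (PySem.List.pyGetD tab i []) == e))).Nodup := by
  intro E
  induction E with
  | nil => intro _; simp
  | cons e E ihE =>
    intro hnd
    rw [List.flatMap_cons]
    refine List.Nodup.append ?_ (ihE (List.nodup_cons.mp hnd).2) ?_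
    · exact (PySem.List.nodup_pyRange_one 0 (tab.length : Int)).filter _
    · intro i hi hi2
      have h1 := (List.mem_filter.mp hi).2
      rw [List.mem_flatMap] at hi2
      obtain ⟨e', he', hif⟩ := hi2
      have h2 := (List.mem_filter.mp hif).2
      rw [beq_iff_eq] at h1 h2
      exact (List.nodup_cons.mp hnd).1 (by rw [← h1, h2]; exact he')

theorem pvFlat_mem (tab : List (List Int)) (E : List Int) (i : Int) :
    i ∈ E.flatMap (fun e => (PySem.List.pyRange 0 (tab.length : Int) 1).filter
        (fun i => pvHd (PySem.List.pyGetD tab i []) == e))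
    ↔ i ∈ PySem.List.pyRange 0 (tab.length : Int) 1
        ∧ pvHd (PySem.List.pyGetD tab i []) ∈ E := by
  rw [List.mem_flatMap]
  constructor
  · rintro ⟨e, he, hif⟩
    obtain ⟨hr, hbeq⟩ := List.mem_filter.mp hif
    rw [beq_iff_eq] at hbeq
    exact ⟨hr, hbeq ▸ he⟩
  · rintro ⟨hr, hmem⟩
    exact ⟨_, hmem, List.mem_filter.mpr ⟨hr, beq_self_eq_true _⟩⟩

-- ===== VERDICT (by name: the statement is the Claim_ definition above) =====
theorem del_entree_spec : Claim_equal_del_entree := by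
  intro tab tache _ hpre
  obtain ⟨hne0, hnerC, hnd, hcnt⟩ := hpre
  unfold Spec_del_entree
  have hndE : (pvE0 tab).Nodup := by rw [pvE0_headD]; exact hnd
  by_cases hE0 : pvE0 tab = []
  · -- no entry vertex: A's loops do nothing and B returns the graph unchanged
    rw [pvB_eq tab tache (by rw [hE0]; rfl), hE0]
    rw [List.filter_eq_self.mpr (fun s _ => by simp),
        List.map_congr_left (fun r (_ : r ∈ tab) => pvRowAll_nil' r), List.map_id']
    simp only [del_entree]
    rw [pvGetEntree, hE0]
    simp only [List.foldl_nil, List.reverse_nil]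
    exact PySem.List.foldl_ignore _ _
  have hner : ∀ r ∈ tab, r ≠ [] := by
    apply hnerC
    intro hfil
    exact hE0 (by unfold pvE0; rw [hfil]; rfl)
  have hcntE : ∀ e ∈ pvE0 tab, ∀ r ∈ tab, (r.drop 2).count e ≤ 1 := by
    intro e he
    exact hcnt e (by rw [← pvE0_headD]; exact he)
  rw [pvB_eq tab tache (pvOfList_nodup _ hndE)]
  simp only [del_entree]
  rw [pvGetEntree]
  have hid : tab.map (pvRowAll []) = tab := by
    rw [List.map_congr_left (fun r _ => pvRowAll_nil' r)]
    exact List.map_id' tab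
  have hph := pvPhase1 tab hner hcntE (pvE0 tab) (fun e he => he) [] []
  rw [hid] at hph
  rw [hph]
  simp only [List.nil_append]
  set E := pvE0 tab with hE
  set tabF : List (List Int) := tab.map (pvRowAll E) with htabF
  set IL : List Int := E.flatMap (fun e => (PySem.List.pyRange 0 (tab.length : Int) 1).filter
      (fun i => pvHd (PySem.List.pyGetD tab i []) == e)) with hIL
  have hILnd : IL.Nodup := pvFlat_nodup tab E hndE
  have hinner : (fun (tabc : List (List Int)) (i : Int) =>
        IL.reverse.foldl (fun t ind => if i == ind then pyPopAt t i else t) tabc)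
      = fun (tabc : List (List Int)) (i : Int) =>
        if IL.contains i then pyPopAt tabc i else tabc := by
    funext tabc i
    exact pvInner i IL tabc (List.nodup_iff_count_le_one.mp hILnd i)
  rw [hinner]
  have hlenF : tabF.length = tab.length := by rw [htabF]; simp
  rw [pvPhase2 tabF.length tabF (fun i => IL.contains i) le_rfl]
  rw [List.drop_length, List.append_nil]
  have hhdF : ∀ (i : Int), 0 ≤ i → i < (tab.length : Int) →
      pvHd (PySem.List.pyGetD tabF i []) = pvHd (PySem.List.pyGetD tab i []) := by
    intro i h0 hl
    rw [PySem.List.pyGetD_eq_getElem tabF [] h0 (by rw [hlenF]; exact hl),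
        PySem.List.pyGetD_eq_getElem tab [] h0 hl]
    simp only [htabF, List.getElem_map]
    exact (pvRowAll_hd E _ (hner _ (List.getElem_mem _))).2
  have hfilc : (PySem.List.pyRange 0 (tabF.length : Int) 1).filter
        (fun i => !(IL.contains i))
      = (PySem.List.pyRange 0 (tabF.length : Int) 1).filter
        (fun i => !(E.contains (pvHd (PySem.List.pyGetD tabF i [])))) := by
    apply List.filter_congr
    intro i hi
    rw [hlenF] at hi
    have hic : IL.contains i = E.contains (pvHd (PySem.List.pyGetD tabF i [])) := by
      have hmr := (PySem.List.mem_pyRange_one).mp hi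
      rw [hhdF i hmr.1 hmr.2]
      cases hmem : E.contains (pvHd (PySem.List.pyGetD tab i [])) with
      | true =>
        have hmem' : pvHd (PySem.List.pyGetD tab i []) ∈ E := by
          simpa [List.contains_iff_mem] using hmem
        have : i ∈ IL := (pvFlat_mem tab E i).mpr ⟨hi, hmem'⟩
        simpa [List.contains_iff_mem] using this
      | false =>
        have hmem' : pvHd (PySem.List.pyGetD tab i []) ∉ E := by
          simpa [List.contains_iff_mem] using hmem
        have : i ∉ IL := fun hmm => hmem' ((pvFlat_mem tab E i).mp hmm).2
        simpa [List.contains_iff_mem] using this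
    rw [hic]
  rw [hfilc, pvFilterMapRange tabF (fun r => !(E.contains (pvHd r)))]
  rw [htabF, List.filter_map]
  congr 1
  apply List.filter_congr
  intro s hs
  simp only [Function.comp_apply]
  rw [(pvRowAll_hd E s (hner s hs)).2]
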